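-- pv_equiv track=rewrite | github.com/kavya7704/Python-Simple-codes | Toss_Play.py | Toss
-- ===== SOURCE A (Python) =====
-- def Toss(s):
--     final_score = 0
--     count = 0
--     for i in s:
--         if count == 3:
--             return final_score
--             break
--         elif i == "H":
--             final_score += 2
--             count += 1
--         elif i == "T":
--             final_score -= 1
--             count = 0
--     return final_score
-- ===== SOURCE B (Python) =====
-- def Toss(s):
--     run = 0
--     cut = len(s)
--     for i, c in enumerate(s):
--         if c == "H":
--             run += 1
--             if run == 3:
--                 cut = i + 1
--                 break
--         elif c == "T":
--             run = 0
--     p = s[:cut]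
--     return p.count("H") * 2 - p.count("T")
-- ===== Notes on version B (the rewrite author's own statement) =====
-- stated objective: alternative
-- what changed: B first finds the cutoff index where the 3rd consecutive H occurs (or end of string), then returns the score in closed form from character counts of that prefix, instead of A's accumulated running score.
import Mathlib
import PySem

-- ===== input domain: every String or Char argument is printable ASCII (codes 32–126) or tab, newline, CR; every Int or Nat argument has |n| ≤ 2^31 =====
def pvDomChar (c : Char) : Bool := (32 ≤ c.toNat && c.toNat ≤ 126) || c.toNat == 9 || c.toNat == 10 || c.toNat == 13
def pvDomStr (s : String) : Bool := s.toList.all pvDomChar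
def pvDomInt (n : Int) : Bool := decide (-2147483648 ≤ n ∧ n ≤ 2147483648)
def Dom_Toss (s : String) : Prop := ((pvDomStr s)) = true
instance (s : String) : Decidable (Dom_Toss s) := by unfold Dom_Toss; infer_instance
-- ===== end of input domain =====

-- B finds the cutoff (through the 3rd consecutive 'H', or end of string) first, then scores that prefix in closed form from counts; alternative decomposition, same cost.


-- ===== PORT A =====
-- A's loop: running score and consecutive-H count; returns early when count hits 3 (check happens at the START of the next iteration).
def TossGo (cs : List Char) (score : Int) (count : Nat) : Int :=
  match cs with
  | [] => score
  | c :: rest =>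
    if count = 3 then score
    else if c = 'H' then TossGo rest (score + 2) (count + 1)
    else if c = 'T' then TossGo rest (score - 1) 0
    else TossGo rest score count

def Toss (s : String) : Int := TossGo s.toList 0 0

-- ===== PORT B =====
-- Source B's boundary scan: the prefix of s through the 3rd consecutive 'H' (whole string if never reached).
def TossCut (cs : List Char) (run : Nat) : List Char :=
  match cs with
  | [] => []
  | c :: rest =>
    if c = 'H' then (if run + 1 = 3 then [c] else c :: TossCut rest (run + 1))
    else if c = 'T' then c :: TossCut rest 0
    else c :: TossCut rest run

def Toss_alt (s : String) : Int :=
  let p := TossCut s.toList 0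
  (p.count 'H' : Int) * 2 - (p.count 'T' : Int)

-- ===== PRECONDITION & SPEC =====
def Spec_Toss (s : String) (out : Int) : Prop := out = Toss_alt s
instance (s : String) (out : Int) : Decidable (Spec_Toss s out) := by unfold Spec_Toss; infer_instance

-- ===== CLAIM (what is proved, stated in full; the proofs are below) =====
def Claim_equal_Toss : Prop := ∀ (s : String), Dom_Toss s → Spec_Toss s (Toss s)

-- ===== LEMMAS AND PROOFS =====
theorem tossGo_three (cs : List Char) (score : Int) : TossGo cs score 3 = score := by
  cases cs with
  | nil => rfl
  | cons c rest => simp [TossGo]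

theorem tossGo_eq_cut (cs : List Char) (score : Int) (count : Nat) (h : count ≤ 2) :
    TossGo cs score count =
      score + ((TossCut cs count).count 'H' : Int) * 2 - ((TossCut cs count).count 'T' : Int) := by
  induction cs generalizing score count with
  | nil => simp [TossGo, TossCut]
  | cons c rest ih =>
    have hne : ¬ count = 3 := by omega
    by_cases hH : c = 'H'
    · subst hH
      by_cases h3 : count + 1 = 3
      · simp [TossGo, TossCut, hne, h3, tossGo_three]
      · have : count + 1 ≤ 2 := by omega
        simp [TossGo, TossCut, hne, h3, ih _ _ this]
        ring
    · by_cases hT : c = 'T'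
      · subst hT
        simp [TossGo, TossCut, hne, ih _ _ (by omega : (0:Nat) ≤ 2)]
        ring
      · simp [TossGo, TossCut, hne, hH, hT, ih _ _ h]

-- ===== VERDICT (by name: the statement is the Claim_ definition above) =====
theorem Toss_spec : Claim_equal_Toss := by
  intro s _
  unfold Spec_Toss Toss Toss_alt
  simpa using tossGo_eq_cut s.toList 0 0 (by omega)
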